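-- pv_equiv track=rewrite | github.com/rithvikru/hacktj2026 | ml/src/hacktj2026_ml/planner.py | canonicalize_from_catalog
-- ===== SOURCE A (Python) =====
-- def canonicalize_from_catalog(text: str, catalog: list[str]) -> str:
--     lowered_catalog = {item.lower(): item.lower() for item in catalog}
--     if text in lowered_catalog:
--         return text
--
--     tokens = text.split()
--     for size in range(len(tokens), 0, -1):
--         suffix = " ".join(tokens[-size:])
--         if suffix in lowered_catalog:
--             prefix = " ".join(tokens[:-size])
--             return " ".join(part for part in (prefix, suffix) if part)
--     return text
-- ===== SOURCE B (Python) =====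
-- def canonicalize_from_catalog(text: str, catalog: list[str]) -> str:
--     keys = {item.lower() for item in catalog}
--     if text in keys:
--         return text
--
--     tokens = text.split()
--     # index every joined token-suffix by the size it came from (larger sizes overwrite)
--     suffix_size = {}
--     for size in range(1, len(tokens) + 1):
--         suffix_size[" ".join(tokens[-size:])] = size
--
--     best = 0
--     for key in keys:
--         best = max(best, suffix_size.get(key, 0))
--     if best == 0:
--         return text
--     prefix = " ".join(tokens[:-best])
--     suffix = " ".join(tokens[-best:])
--     return " ".join(part for part in (prefix, suffix) if part)
-- ===== Notes on version B (the rewrite author's own statement) =====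
-- stated objective: alternative
-- what changed: Replaces A's descending scan over suffix sizes with an early return by building a dict that indexes every joined token-suffix by its size once and then taking the max matched size over the distinct lowered catalog keys.
import Mathlib
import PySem

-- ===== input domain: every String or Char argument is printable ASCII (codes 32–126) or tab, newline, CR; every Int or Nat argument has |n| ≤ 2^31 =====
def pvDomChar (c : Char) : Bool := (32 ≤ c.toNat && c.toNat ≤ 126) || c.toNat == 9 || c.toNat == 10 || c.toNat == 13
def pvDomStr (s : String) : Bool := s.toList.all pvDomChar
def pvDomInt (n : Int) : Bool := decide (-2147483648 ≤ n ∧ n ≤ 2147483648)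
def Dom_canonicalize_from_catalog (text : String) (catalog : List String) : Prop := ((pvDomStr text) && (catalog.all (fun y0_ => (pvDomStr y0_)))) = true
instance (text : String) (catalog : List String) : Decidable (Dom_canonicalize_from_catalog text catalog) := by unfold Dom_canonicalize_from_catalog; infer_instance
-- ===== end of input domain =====

-- ===== PORT A =====
-- B indexes every joined token-suffix by its size in a dict and takes the max size matched
-- by a lowered catalog key, instead of A's descending scan over suffix sizes (objective: alternative).

-- " ".join(tokens[-size:])  (used verbatim by both Pythons)
def pvSuffixAt (tokens : List String) (size : Int) : String :=
  PySem.Str.join " " (PySem.List.slice tokens (some (-size)) none)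

-- " ".join(part for part in (prefix, suffix) if part)  (used verbatim by both Pythons)
def pvJoined (tokens : List String) (size : Int) : String :=
  let pre := PySem.Str.join " " (PySem.List.slice tokens none (some (-size)))
  PySem.Str.join " " ([pre, pvSuffixAt tokens size].filter (fun part => part != ""))

-- for size in range(len(tokens), 0, -1): ... (early return on first membership hit)
def pvLoopA (tokens : List String) (lowered : PySem.Dict String String) (text : String) :
    List Int → String
  | [] => text
  | size :: rest =>
    if lowered.contains (pvSuffixAt tokens size) then pvJoined tokens size
    else pvLoopA tokens lowered text rest

def canonicalize_from_catalog (text : String) (catalog : List String) : String :=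
  let lowered := catalog.foldl
    (fun d item => d.insert (PySem.Str.lower item) (PySem.Str.lower item)) PySem.Dict.empty
  if lowered.contains text then text
  else
    let tokens := PySem.Str.split₀ text
    pvLoopA tokens lowered text (PySem.List.pyRange (tokens.length : Int) 0 (-1))

-- ===== PORT B =====
-- suffix_size = {}; for size in range(1, len(tokens)+1): suffix_size[" ".join(tokens[-size:])] = size
def pvSuffixSizeDict (tokens : List String) : PySem.Dict String Int :=
  (PySem.List.pyRange 1 ((tokens.length : Int) + 1) 1).foldl
    (fun d size => d.insert (pvSuffixAt tokens size) size) PySem.Dict.empty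

def canonicalize_from_catalog_alt (text : String) (catalog : List String) : String :=
  let keys : PySem.Set String := PySem.Set.ofList (catalog.map PySem.Str.lower)
  if keys.contains text then text
  else
    let tokens := PySem.Str.split₀ text
    let suffixSize := pvSuffixSizeDict tokens
    let best := keys.foldl (fun best key => max best (suffixSize.getD key 0)) (0 : Int)
    if best = 0 then text
    else pvJoined tokens best

-- ===== PRECONDITION & SPEC =====
def Spec_canonicalize_from_catalog (text : String) (catalog : List String) (out : String) : Prop := out = canonicalize_from_catalog_alt text catalog
instance (text : String) (catalog : List String) (out : String) : Decidable (Spec_canonicalize_from_catalog text catalog out) := by unfold Spec_canonicalize_from_catalog; infer_instance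

-- ===== CLAIM (what is proved, stated in full; the proofs are below) =====
def Claim_equal_canonicalize_from_catalog : Prop := ∀ (text : String) (catalog : List String), Dom_canonicalize_from_catalog text catalog → Spec_canonicalize_from_catalog text catalog (canonicalize_from_catalog text catalog)

-- ===== LEMMAS AND PROOFS =====

-- A's descending size range is the reverse of B's ascending one
theorem pvDesc (n : Nat) :
    PySem.List.pyRange (n : Int) 0 (-1) = (PySem.List.pyRange 1 ((n : Int) + 1) 1).reverse := by
  rw [PySem.List.pyRange_of_pos 1 ((n:Int)+1) (by norm_num)]
  unfold PySem.List.pyRange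
  norm_num
  rw [show (if 0 < n then n else 0) = n by split <;> omega]
  apply List.ext_getElem
  · simp
  · intro i h₁ h₂
    simp only [List.length_map, List.length_range] at h₁ h₂
    rw [List.getElem_reverse]
    simp only [List.getElem_map, List.getElem_range, List.length_map, List.length_range]
    omega

theorem pvAscMem (n : Nat) (s : Int) (h : s ∈ PySem.List.pyRange 1 ((n : Int) + 1) 1) :
    0 < s := by
  rw [PySem.List.mem_pyRange_one] at h
  omega

theorem pvDescMem (n : Nat) (s : Int) (h : s ∈ PySem.List.pyRange (n : Int) 0 (-1)) :
    0 < s := by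
  rw [pvDesc, List.mem_reverse] at h
  exact pvAscMem n s h

theorem pvDescSorted (n : Nat) :
    (PySem.List.pyRange (n : Int) 0 (-1)).Pairwise (· > ·) := by
  rw [pvDesc, List.pairwise_reverse]
  rw [PySem.List.pyRange_of_pos 1 ((n:Int)+1) (by norm_num)]
  refine List.Pairwise.map _ ?_ (List.pairwise_lt_range)
  intro a b hab
  omega

-- the loop of A is a find? over its size list
theorem pvLoopA_eq (tokens : List String) (d : PySem.Dict String String) (text : String)
    (L : List Int) :
    pvLoopA tokens d text L =
      match L.find? (fun s => d.contains (pvSuffixAt tokens s)) with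
      | some s => pvJoined tokens s
      | none => text := by
  induction L with
  | nil => rfl
  | cons size rest ih =>
    rw [pvLoopA, List.find?_cons]
    by_cases h : d.contains (pvSuffixAt tokens size) <;> simp [h, ih]

-- membership in A's lowered dict = membership in B's lowered set
theorem pvContains (catalog : List String) (s : String) :
    (catalog.foldl
      (fun d item => d.insert (PySem.Str.lower item) (PySem.Str.lower item))
      PySem.Dict.empty).contains s
    = PySem.Set.contains (PySem.Set.ofList (catalog.map PySem.Str.lower)) s := by
  have hk := PySem.Dict.keys_foldl_insert_key catalog PySem.Str.lower
      (fun _ item => PySem.Str.lower item) PySem.Dict.empty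
  rw [PySem.Dict.contains_eq_decide_mem_keys, hk]
  rw [PySem.Set.contains_eq_decide]
  congr 1

-- lookup in a dict built by inserting (J s, s) along l = first match of l.reverse
theorem pvGetFoldl (J : Int → String) (l : List Int) (d : PySem.Dict String Int) (k : String) :
    (l.foldl (fun d s => d.insert (J s) s) d).get? k =
      match l.reverse.find? (fun s => J s == k) with
      | some s => some s
      | none => d.get? k := by
  induction l generalizing d with
  | nil => rfl
  | cons s rest ih =>
    rw [List.foldl_cons, ih, List.reverse_cons, List.find?_append]
    cases hfind : rest.reverse.find? (fun s => J s == k) with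
    | some s' => simp
    | none =>
      simp only [Option.none_or, List.find?_cons, List.find?_nil]
      rw [PySem.Dict.get?_insert]
      by_cases hjs : J s = k
      · simp [hjs]
      · rw [show (J s == k) = false from beq_eq_false_iff_ne.mpr hjs,
            if_neg (fun h => hjs h.symm)]

-- B's dict lookup, stated over A's descending size list
theorem pvGetD (tokens : List String) (k : String) :
    (pvSuffixSizeDict tokens).getD k 0 =
      match (PySem.List.pyRange (tokens.length : Int) 0 (-1)).find?
          (fun s => pvSuffixAt tokens s == k) with
      | some s => s
      | none => 0 := by
  rw [PySem.Dict.getD_eq_get?_getD]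
  unfold pvSuffixSizeDict
  rw [pvGetFoldl, ← pvDesc]
  cases (PySem.List.pyRange (tokens.length : Int) 0 (-1)).find?
      (fun s => pvSuffixAt tokens s == k) with
  | some s => rfl
  | none => simp [PySem.Dict.get?_empty]

-- on a strictly decreasing list, find? returns the greatest satisfying element
theorem pvFindMax {p : Int → Bool} {L : List Int} (hL : L.Pairwise (· > ·)) {a : Int}
    (hf : L.find? p = some a) : ∀ b ∈ L, p b = true → b ≤ a := by
  induction L with
  | nil => simp
  | cons x rest ih =>
    rw [List.find?_cons] at hf
    rcases List.pairwise_cons.mp hL with ⟨hx, hrest⟩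
    by_cases hp : p x
    · simp [hp] at hf
      subst hf
      intro b hb hpb
      rcases hb with _ | hb
      · rfl
      · exact le_of_lt (hx b (by assumption))
    · simp [hp] at hf
      intro b hb hpb
      rcases hb with _ | hb
      · simp_all
      · exact ih hrest hf b (by assumption) hpb

theorem pvFoldlMaxLe (t : List Int) (a c : Int) (ha : a ≤ c) (h : ∀ y ∈ t, y ≤ c) :
    t.foldl max a ≤ c := by
  induction t generalizing a with
  | nil => simpa
  | cons y t ih =>
    rw [List.foldl_cons]
    exact ih _ (max_le ha (h y (by simp))) (fun z hz => h z (by simp [hz]))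

-- the core: B's max over keys of indexed sizes = A's first hit on the descending list
theorem pvCore (J : Int → String) (L : List Int) (K : List String)
    (hL : L.Pairwise (· > ·)) (hpos : ∀ s ∈ L, 0 < s) :
    K.foldl (fun b k =>
        max b (match L.find? (fun s => J s == k) with | some s => s | none => 0)) 0
    = match L.find? (fun s => PySem.Set.contains K (J s)) with
      | some s => s
      | none => 0 := by
  have hg_mem : ∀ k, (match L.find? (fun s => J s == k) with | some s => s | none => 0) = 0
      ∨ ((match L.find? (fun s => J s == k) with | some s => s | none => 0) ∈ L
         ∧ J (match L.find? (fun s => J s == k) with | some s => s | none => 0) = k) := by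
    intro k
    cases hf : L.find? (fun s => J s == k) with
    | none => left; rfl
    | some s =>
      right
      refine ⟨List.mem_of_find?_eq_some hf, ?_⟩
      have := List.find?_some hf
      simpa using this
  set g : String → Int := fun k =>
    (match L.find? (fun s => J s == k) with | some s => s | none => 0) with hgdef
  show (K.foldl (fun b k => max b (g k)) 0) = _
  rw [← List.foldl_map]
  cases hA : L.find? (fun s => PySem.Set.contains K (J s)) with
  | none =>
    have hnone := List.find?_eq_none.mp hA
    apply le_antisymm
    · apply pvFoldlMaxLe _ _ _ le_rfl
      intro y hy
      rcases List.mem_map.mp hy with ⟨k, hk, rfl⟩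
      rcases hg_mem k with h0 | ⟨hmem, hJ⟩
      · simp [hgdef, h0]
      · exfalso
        refine hnone _ hmem ?_
        rw [hJ]
        simp [hk]
    · exact (PySem.List.le_foldl_max _ _).1
  | some s₀ =>
    have hs_mem := List.mem_of_find?_eq_some hA
    have hs_p : PySem.Set.contains K (J s₀) = true := by
      simpa using List.find?_some hA
    have hJK : J s₀ ∈ K := by
      simpa using hs_p
    show (K.map g).foldl max 0 = s₀
    apply le_antisymm
    · apply pvFoldlMaxLe _ _ _ (le_of_lt (hpos _ hs_mem))
      intro y hy
      rcases List.mem_map.mp hy with ⟨k, hk, rfl⟩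
      rcases hg_mem k with h0 | ⟨hmem, hJ⟩
      · rw [show g k = 0 from h0]
        exact le_of_lt (hpos _ hs_mem)
      · refine pvFindMax hL hA _ hmem ?_
        rw [hJ]
        simp [hk]
    · have hex : L.find? (fun s => J s == J s₀) ≠ none := by
        intro hn
        exact absurd (by simp : (J s₀ == J s₀) = true)
          (by simpa using List.find?_eq_none.mp hn s₀ hs_mem)
      cases hf' : L.find? (fun s => J s == J s₀) with
      | none => exact absurd hf' hex
      | some s' =>
        have h1 : s' ∈ L := List.mem_of_find?_eq_some hf'
        have h2 : J s' = J s₀ := by simpa using List.find?_some hf'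
        have hle1 : s₀ ≤ s' := pvFindMax hL hf' s₀ hs_mem (by simp)
        have hle2 : s' ≤ s₀ := pvFindMax hL hA s' h1 (by rw [h2]; exact hs_p)
        have hgs : g (J s₀) = s₀ := by
          rw [hgdef]; simp only [hf']; omega
        have := (PySem.List.le_foldl_max (K.map g) 0).2 (g (J s₀))
          (List.mem_map.mpr ⟨J s₀, hJK, rfl⟩)
        omega

-- ===== VERDICT (by name: the statement is the Claim_ definition above) =====
theorem canonicalize_from_catalog_spec : Claim_equal_canonicalize_from_catalog := by
  intro text catalog _
  unfold Spec_canonicalize_from_catalog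
  unfold canonicalize_from_catalog canonicalize_from_catalog_alt
  dsimp only
  rw [pvContains catalog text]
  by_cases h : PySem.Set.contains (PySem.Set.ofList (catalog.map PySem.Str.lower)) text
  · simp only [h, if_true]
  · simp only [h, if_false, Bool.false_eq_true]
    rw [pvLoopA_eq]
    simp only [pvContains, pvGetD]
    rw [pvCore (pvSuffixAt (PySem.Str.split₀ text))
        (PySem.List.pyRange ((PySem.Str.split₀ text).length : Int) 0 (-1))
        (PySem.Set.ofList (catalog.map PySem.Str.lower))
        (pvDescSorted _) (pvDescMem _)]
    cases hF : (PySem.List.pyRange ((PySem.Str.split₀ text).length : Int) 0 (-1)).find?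
        (fun s => PySem.Set.contains (PySem.Set.ofList (catalog.map PySem.Str.lower))
          (pvSuffixAt (PySem.Str.split₀ text) s)) with
    | none => rfl
    | some s =>
      have hpos : 0 < s := pvDescMem _ s (List.mem_of_find?_eq_some hF)
      simp only []
      rw [if_neg (by omega)]
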